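-- pv_equiv track=rewrite | github.com/PHBueno/cript | subs-polialfabetica/cif.py | dcif
-- ===== SOURCE A (Python) =====
-- alfabeto        = "ABCDEFGHIJKLMNOPQRSTUVWXYZ-"
--
-- alfabeto_subs_1 = "ERT-DVBXWLAKZINQCFGHMOPSUYJ"
--
-- alfabeto_subs_2 = "DTWEVBMRL-UINXYCFGHJQSKZOPA"
--
-- def tabela_subs(alfabeto_subs: str, alfabeto_originario: str):
--     subs_schema = {}
--     for i in range(0, len(alfabeto_originario)):
--         subs_schema[alfabeto_originario[i]] = alfabeto_subs[i]
--     return subs_schema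
--
-- def ocorrencias(msg: str):
--     oc = {}
--     pos = 0
--     l = 0
--     _index = []
--     for i in range(0, len(msg)):
--         while l < len(alfabeto):
--             index = msg.find(alfabeto[l], pos)
--             if index == -1:  # Não encontrou a letra na mensagem
--                 _index = []
--                 l += 1
--                 pos = 0
--                 pass
--             else:  # Encontrou a letra na mensagem
--                 _index.append(index)
--                 oc[f"{alfabeto[l]}"] = _index
--                 pos = index + 1
--         l = 0
--         pos = 0
--     return oc
--
-- def dcif(msg: str):
--     oc = ocorrencias(msg)
--     _msg = msg
--     s1 = tabela_subs(alfabeto_subs=alfabeto, alfabeto_originario=alfabeto_subs_1)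
--     s2 = tabela_subs(alfabeto_subs=alfabeto, alfabeto_originario=alfabeto_subs_2)
--     for l in oc:
--         cont = 0
--         quantidade = oc[l]
--         while True:
--             if cont >= len(quantidade):
--                 break
--             if cont == 0:
--                 _msg = _msg[:quantidade[0]] + s1[l] + _msg[quantidade[0] + 1:]
--             if len(quantidade) >= 2:
--                 _msg = _msg[:quantidade[1]] + s2[l] + _msg[quantidade[1] + 1:]
--                 del quantidade[0:2]
--                 cont = 0
--                 if len(quantidade) >= 1:
--                     _msg = _msg[:quantidade[0]] + l + _msg[quantidade[0] + 1:]
--                     del quantidade[0]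
--             else:
--                 cont += 1
--     return _msg
-- ===== SOURCE B (Python) =====
-- alfabeto        = "ABCDEFGHIJKLMNOPQRSTUVWXYZ-"
--
-- alfabeto_subs_1 = "ERT-DVBXWLAKZINQCFGHMOPSUYJ"
--
-- alfabeto_subs_2 = "DTWEVBMRL-UINXYCFGHJQSKZOPA"
--
-- def dcif(msg: str):
--     # single linear pass; k-th occurrence of a cipher letter decodes via s1, s2, identity by k % 3
--     s1 = dict(zip(alfabeto_subs_1, alfabeto))
--     s2 = dict(zip(alfabeto_subs_2, alfabeto))
--     counts = {}
--     out = []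
--     for ch in msg:
--         if ch in s1:
--             k = counts.get(ch, 0)
--             counts[ch] = k + 1
--             out.append((s1[ch], s2[ch], ch)[k % 3])
--         else:
--             out.append(ch)
--     return "".join(out)
-- ===== Notes on version B (the rewrite author's own statement) =====
-- stated objective: faster
-- what changed: A scans the alphabet with repeated str.find to collect every letter's occurrence positions (rebuilt len(msg) times) and then splices the message string position by position per letter; B decodes in one linear pass with a per-character occurrence counter, choosing s1/s2/identity by count % 3.
import Mathlib
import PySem

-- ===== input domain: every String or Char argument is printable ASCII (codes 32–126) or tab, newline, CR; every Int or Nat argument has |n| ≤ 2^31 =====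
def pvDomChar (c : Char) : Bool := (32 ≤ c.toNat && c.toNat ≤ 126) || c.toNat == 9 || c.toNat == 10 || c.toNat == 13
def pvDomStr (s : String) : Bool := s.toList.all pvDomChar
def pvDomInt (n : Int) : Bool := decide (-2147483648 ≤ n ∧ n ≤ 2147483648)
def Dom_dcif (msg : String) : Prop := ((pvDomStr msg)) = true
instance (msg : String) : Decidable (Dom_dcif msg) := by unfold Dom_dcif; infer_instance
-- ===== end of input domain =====

-- B replaces A's quadratic find-all-occurrences pass repeated len(msg) times and the
-- splice-heavy per-letter while loop by one linear pass with a per-character counter.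

-- ===== PORT A =====
def pvAlfa : List Char := "ABCDEFGHIJKLMNOPQRSTUVWXYZ-".toList
def pvSubs1 : List Char := "ERT-DVBXWLAKZINQCFGHMOPSUYJ".toList
def pvSubs2 : List Char := "DTWEVBMRL-UINXYCFGHJQSKZOPA".toList

-- tabela_subs: for i in range(len(orig)): schema[orig[i]] = subs[i]
-- (index i is always in range for the two call sites, so the pyGetD default ' ' is never used)
def tabelaSubs (subs orig : List Char) : PySem.Dict Char Char :=
  (PySem.List.pyRange 0 (orig.length) 1).foldl
    (fun d i => d.insert (PySem.List.pyGetD orig i ' ') (PySem.List.pyGetD subs i ' '))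
    PySem.Dict.empty

theorem pv_find_bound (cs : List Char) (c : Char) (pos : Nat)
    (h : PySem.Chars.findFrom cs [c] (pos : Int) none ≠ -1) :
    pos ≤ (PySem.Chars.findFrom cs [c] (pos : Int) none).toNat ∧
    (PySem.Chars.findFrom cs [c] (pos : Int) none).toNat < cs.length := by
  by_cases hp : pos ≤ cs.length
  · obtain ⟨hle, hpre, -⟩ := PySem.Chars.findFrom_natCast_spec cs [c] pos hp h
    rcases hpre with ⟨t, ht⟩
    have hlen : (List.drop (PySem.Chars.findFrom cs [c] (pos : Int) none).toNat cs).length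
        = 1 + t.length := by rw [← ht]; simp; omega
    rw [List.length_drop] at hlen
    constructor
    · omega
    · omega
  · exfalso
    apply h
    simp only [PySem.Chars.findFrom]
    rw [if_pos]
    split <;> omega

-- the inner 'while l < len(alfabeto)' loop of ocorrencias (state: oc, pos, l, _index)
def ocLoop (cs : List Char) (oc : PySem.Dict Char (List Int)) (pos l : Nat) (ix : List Int) :
    PySem.Dict Char (List Int) :=
  if hl : l < pvAlfa.length then
    let idx := PySem.Chars.findFrom cs [pvAlfa[l]] (pos : Int) none
    if hidx : idx = -1 then
      ocLoop cs oc 0 (l + 1) []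
    else
      ocLoop cs (oc.insert pvAlfa[l] (ix ++ [idx])) (idx.toNat + 1) l (ix ++ [idx])
  else oc
termination_by (pvAlfa.length - l, cs.length + 1 - pos)
decreasing_by
  · exact Prod.Lex.left _ _ (by omega)
  · exact Prod.Lex.right _ (by
      have := pv_find_bound cs (pvAlfa[l]) pos hidx
      omega)

def ocorrencias (cs : List Char) : PySem.Dict Char (List Int) :=
  (PySem.List.pyRange 0 cs.length 1).foldl (fun oc _ => ocLoop cs oc 0 0 []) PySem.Dict.empty

-- _msg = _msg[:p] + ch + _msg[p+1:]
def pySplice (m : List Char) (p : Int) (ch : Char) : List Char :=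
  PySem.List.slice m none (some p) ++ [ch] ++ PySem.List.slice m (some (p + 1)) none

theorem pv_slice_len (q : List Int) (a : Int) (ha : 0 ≤ a) :
    (PySem.List.slice q (some a) none).length = q.length - a.toNat := by
  simp [PySem.List.slice_from q ha]

-- the 'while True' replacement loop of dcif for one letter l (s1c/s2c are s1[l]/s2[l])
def dcifWhile (s1c s2c : Char) (l : Char) (q : List Int) (cont : Nat) (m : List Char) :
    List Char :=
  if h : cont ≥ q.length then m
  else
    let m1 := if cont = 0 then pySplice m (PySem.List.pyGetD q 0 0) s1c else m
    if h2 : 2 ≤ q.length then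
      let m2 := pySplice m1 (PySem.List.pyGetD q 1 0) s2c
      let q2 := PySem.List.slice q (some 2) none
      if _h3 : 1 ≤ q2.length then
        dcifWhile s1c s2c l (PySem.List.slice q2 (some 1) none) 0
          (pySplice m2 (PySem.List.pyGetD q2 0 0) l)
      else
        dcifWhile s1c s2c l q2 0 m2
    else
      dcifWhile s1c s2c l q (cont + 1) m1
termination_by 2 * q.length + (if cont = 0 then 1 else 0)
decreasing_by
  · have e1 := pv_slice_len q 2 (by omega)
    have e2 := pv_slice_len (PySem.List.slice q (some 2) none) 1 (by omega)
    simp only [e1, e2]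
    split <;> omega
  · have e1 := pv_slice_len q 2 (by omega)
    simp only [e1]
    split <;> omega
  · have hc : cont = 0 := by omega
    subst hc; simp

def dcif (msg : String) : String :=
  let cs := msg.toList
  let oc := ocorrencias cs
  let s1 := tabelaSubs pvAlfa pvSubs1
  let s2 := tabelaSubs pvAlfa pvSubs2
  -- for l in oc: run the while-loop on quantidade = oc[l]  (keys of oc are its letters;
  -- s1[l]/s2[l] always hit, so the getD default ' ' is never used)
  String.ofList
    (oc.keys.foldl
      (fun m l => dcifWhile (s1.getD l ' ') (s2.getD l ' ') l (oc.getD l []) 0 m) cs)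

-- ===== PORT B =====
def dcif_alt (msg : String) : String :=
  let s1 : PySem.Dict Char Char := PySem.Dict.ofList (pvSubs1.zip pvAlfa)
  let s2 : PySem.Dict Char Char := PySem.Dict.ofList (pvSubs2.zip pvAlfa)
  -- single pass; the 3-tuple selection (s1[ch], s2[ch], ch)[k % 3] is ported as an if-chain
  let st := msg.toList.foldl
    (fun (st : PySem.Dict Char Int × List Char) ch =>
      if s1.contains ch then
        let k := st.1.getD ch 0
        let dec := if PySem.Int.mod k 3 = 0 then s1.getD ch ch
                   else if PySem.Int.mod k 3 = 1 then s2.getD ch ch else ch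
        (st.1.insert ch (k + 1), st.2 ++ [dec])
      else (st.1, st.2 ++ [ch]))
    (PySem.Dict.empty, [])
  String.ofList st.2

-- ===== PRECONDITION & SPEC =====
def Spec_dcif (msg : String) (out : String) : Prop := out = dcif_alt msg
instance (msg : String) (out : String) : Decidable (Spec_dcif msg out) := by unfold Spec_dcif; infer_instance

-- ===== CLAIM (what is proved, stated in full; the proofs are below) =====
def Claim_equal_dcif : Prop := ∀ (msg : String), Dom_dcif msg → Spec_dcif msg (dcif msg)

-- ===== LEMMAS AND PROOFS =====

theorem pv_prefix_single (c : Char) (l : List Char) : [c] <+: l ↔ l.head? = some c := by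
  constructor
  · rintro ⟨t, rfl⟩; rfl
  · intro h
    cases l with
    | nil => simp at h
    | cons a t => simp at h; subst h; exact ⟨t, rfl⟩


theorem pv_find_past (cs : List Char) (c : Char) (pos : Nat) (hp : cs.length < pos) :
    PySem.Chars.findFrom cs [c] (pos : Int) none = -1 := by
  simp only [PySem.Chars.findFrom]
  rw [if_pos]
  split <;> omega

-- termination helper for the inner while of 'ocorrencias' (cited in decreasing_by)


-- abbreviations for A's two substitution tables
def pvT1 : PySem.Dict Char Char := tabelaSubs pvAlfa pvSubs1
def pvT2 : PySem.Dict Char Char := tabelaSubs pvAlfa pvSubs2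

-- the decoded character for the k-th (0-based) occurrence of letter c
def pvDec (c : Char) (k : Nat) : Char :=
  if k % 3 = 0 then pvT1.getD c ' ' else if k % 3 = 1 then pvT2.getD c ' ' else c

-- reference decoding, one char at a time (pre = already-consumed prefix)
def pvSpecGo : List Char → List Char → List Char
  | _, [] => []
  | pre, c :: t => (if c ∈ pvSubs1 then pvDec c (pre.count c) else c) :: pvSpecGo (pre ++ [c]) t

-- indices ≥ pos at which character c occurs in cs
def pvOccsFrom (cs : List Char) (c : Char) (pos : Nat) : List Nat :=
  if h : pos < cs.length then
    if cs[pos]? = some c then pos :: pvOccsFrom cs c (pos + 1) else pvOccsFrom cs c (pos + 1)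
  else []
termination_by cs.length - pos

def pvOccs (cs : List Char) (c : Char) : List Nat := pvOccsFrom cs c 0

-- occurrences of c among indices [a, b)
def pvCnt (cs : List Char) (c : Char) (a b : Nat) : Nat :=
  (List.range' a (b - a)).countP (fun j => cs[j]? == some c)

theorem mem_pvOccsFrom (cs : List Char) (c : Char) (pos j : Nat) :
    j ∈ pvOccsFrom cs c pos ↔ pos ≤ j ∧ cs[j]? = some c := by
  rw [pvOccsFrom]
  by_cases h : pos < cs.length
  · simp only [dif_pos h]
    by_cases hc : cs[pos]? = some c
    · simp only [if_pos hc, List.mem_cons, mem_pvOccsFrom cs c (pos+1)]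
      constructor
      · rintro (rfl | ⟨h1, h2⟩) <;> simp_all <;> omega
      · rintro ⟨h1, h2⟩
        rcases Nat.eq_or_lt_of_le h1 with rfl | h1
        · exact Or.inl rfl
        · exact Or.inr ⟨h1, h2⟩
    · simp only [if_neg hc, mem_pvOccsFrom cs c (pos+1)]
      constructor
      · rintro ⟨h1, h2⟩; exact ⟨by omega, h2⟩
      · rintro ⟨h1, h2⟩
        rcases Nat.eq_or_lt_of_le h1 with rfl | h1
        · exact absurd h2 hc
        · exact ⟨h1, h2⟩
  · simp only [dif_neg h, List.not_mem_nil, false_iff]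
    rintro ⟨h1, h2⟩
    have : j < cs.length := by
      by_contra hj
      rw [List.getElem?_eq_none (by omega)] at h2; simp at h2
    omega
termination_by cs.length - pos
theorem nodup_pvOccsFrom (cs : List Char) (c : Char) (pos : Nat) :
    (pvOccsFrom cs c pos).Nodup := by
  rw [pvOccsFrom]
  by_cases h : pos < cs.length
  · simp only [dif_pos h]
    by_cases hc : cs[pos]? = some c
    · simp only [if_pos hc, List.nodup_cons]
      refine ⟨fun hmem => ?_, nodup_pvOccsFrom cs c (pos+1)⟩
      rw [mem_pvOccsFrom] at hmem; omega
    · simp only [if_neg hc]; exact nodup_pvOccsFrom cs c (pos+1)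
  · simp [dif_neg h]
termination_by cs.length - pos
theorem pvOccsFrom_eq_nil (cs : List Char) (c : Char) (pos : Nat)
    (h : ∀ j, pos ≤ j → cs[j]? ≠ some c) : pvOccsFrom cs c pos = [] := by
  rw [List.eq_nil_iff_forall_not_mem]
  intro j hj
  rw [mem_pvOccsFrom] at hj
  exact h j hj.1 hj.2
theorem pvOccsFrom_skip (cs : List Char) (c : Char) (pos i : Nat) (hpi : pos ≤ i)
    (hmin : ∀ j, pos ≤ j → j < i → cs[j]? ≠ some c) :
    pvOccsFrom cs c pos = pvOccsFrom cs c i := by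
  rcases Nat.eq_or_lt_of_le hpi with rfl | hlt
  · rfl
  · rw [pvOccsFrom]
    by_cases h : pos < cs.length
    · simp only [dif_pos h, if_neg (hmin pos le_rfl hlt)]
      exact pvOccsFrom_skip cs c (pos+1) i (by omega) (fun j h1 h2 => hmin j (by omega) h2)
    · have : pvOccsFrom cs c i = [] := by
        apply pvOccsFrom_eq_nil
        intro j hj hc
        have : j < cs.length := by
          by_contra hj2
          rw [List.getElem?_eq_none (by omega)] at hc; simp at hc
        omega
      simp [dif_neg h, this]
termination_by i - pos
theorem idxOf_pvOccsFrom (cs : List Char) (c : Char) (pos i : Nat) (hpi : pos ≤ i)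
    (hi : cs[i]? = some c) : (pvOccsFrom cs c pos).idxOf i = pvCnt cs c pos i := by
  have hilen : i < cs.length := by
    by_contra hj
    rw [List.getElem?_eq_none (by omega)] at hi; simp at hi
  rcases Nat.eq_or_lt_of_le hpi with rfl | hlt
  · rw [pvOccsFrom]
    simp only [dif_pos hilen, if_pos hi, List.idxOf_cons_self]
    simp [pvCnt]
  · rw [pvOccsFrom]
    simp only [dif_pos (by omega : pos < cs.length)]
    have hrec := idxOf_pvOccsFrom cs c (pos+1) i (by omega) hi
    have hcnt : pvCnt cs c pos i = (if cs[pos]? = some c then 1 else 0) + pvCnt cs c (pos+1) i := by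
      unfold pvCnt
      have : i - pos = (i - (pos+1)) + 1 := by omega
      rw [this, List.range'_succ, List.countP_cons]
      by_cases hc : cs[pos]? = some c <;> simp [hc] <;> omega
    by_cases hc : cs[pos]? = some c
    · simp only [if_pos hc]
      rw [List.idxOf_cons_ne _ (by omega : pos ≠ i)]
      rw [hrec, hcnt, if_pos hc]; omega
    · simp only [if_neg hc]
      rw [hrec, hcnt, if_neg hc]; omega
termination_by i - pos
theorem pvCnt_count (cs : List Char) (c : Char) (i : Nat) :
    pvCnt cs c 0 i = (cs.take i).count c := by
  induction i with
  | zero => simp [pvCnt]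
  | succ n ihn =>
    rw [List.take_add_one, List.count_append]
    have : pvCnt cs c 0 (n+1) = pvCnt cs c 0 n + (if cs[n]? = some c then 1 else 0) := by
      unfold pvCnt
      simp only [Nat.sub_zero, List.range'_concat, List.countP_append]
      by_cases hc : cs[n]? = some c <;> simp [hc]
    rw [this, ihn]
    by_cases hc : cs[n]? = some c
    · rw [if_pos hc, hc]; simp
    · rw [if_neg hc]
      cases hn : cs[n]? with
      | none => simp
      | some d =>
        simp [hn] at hc
        simp [List.count_singleton]
        omega
theorem pv_find_neg (cs : List Char) (c : Char) (pos : Nat)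
    (h : PySem.Chars.findFrom cs [c] (pos : Int) none = -1) :
    ∀ j, pos ≤ j → cs[j]? ≠ some c := by
  intro j hj hc
  have hjlen : j < cs.length := by
    by_contra hx
    rw [List.getElem?_eq_none (by omega)] at hc; simp at hc
  have hp : pos ≤ cs.length := by omega
  rw [PySem.Chars.findFrom_natCast_eq_neg_one_iff cs [c] pos hp] at h
  apply h
  have h1 : [c] <+: List.drop (j - pos) (List.drop pos cs) := by
    rw [List.drop_drop, (by omega : pos + (j - pos) = j)]
    rw [pv_prefix_single, List.head?_drop]; exact hc
  exact h1.isInfix.trans (List.drop_suffix _ _).isInfix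
theorem pv_find_pos (cs : List Char) (c : Char) (pos : Nat)
    (h : PySem.Chars.findFrom cs [c] (pos : Int) none ≠ -1) :
    cs[(PySem.Chars.findFrom cs [c] (pos : Int) none).toNat]? = some c ∧
    ∀ j, pos ≤ j → j < (PySem.Chars.findFrom cs [c] (pos : Int) none).toNat →
      cs[j]? ≠ some c := by
  have hp : pos ≤ cs.length := by
    by_contra hx
    exact h (pv_find_past cs c pos (by omega))
  obtain ⟨hle, hpre, hmin⟩ := PySem.Chars.findFrom_natCast_spec cs [c] pos hp h
  constructor
  · rw [← List.head?_drop, ← pv_prefix_single]; exact hpre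
  · intro j h1 h2 hc
    apply hmin j h1 h2
    rw [pv_prefix_single, List.head?_drop]; exact hc
theorem pv_find_nonneg (cs : List Char) (c : Char) (pos : Nat)
    (h : PySem.Chars.findFrom cs [c] (pos : Int) none ≠ -1) :
    0 ≤ PySem.Chars.findFrom cs [c] (pos : Int) none := by
  by_cases hp : pos ≤ cs.length
  · obtain ⟨hle, -, -⟩ := PySem.Chars.findFrom_natCast_spec cs [c] pos hp h
    omega
  · exact absurd (pv_find_past cs c pos (by omega)) h

theorem ocLoop_letter (cs : List Char) (l : Nat) (hl : l < pvAlfa.length)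
    (pos : Nat) (ix : List Int) (oc : PySem.Dict Char (List Int)) :
    ocLoop cs oc pos l ix =
      ocLoop cs
        (if pvOccsFrom cs (pvAlfa[l]) pos = [] then oc
         else oc.insert pvAlfa[l] (ix ++ (pvOccsFrom cs (pvAlfa[l]) pos).map Int.ofNat))
        0 (l + 1) [] := by
  rw [ocLoop]
  simp only [dif_pos hl]
  by_cases hidx : PySem.Chars.findFrom cs [pvAlfa[l]] (pos : Int) none = -1
  · rw [dif_pos hidx]
    rw [pvOccsFrom_eq_nil cs (pvAlfa[l]) pos (pv_find_neg cs (pvAlfa[l]) pos hidx)]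
    rw [if_pos rfl]
  · rw [dif_neg hidx]
    obtain ⟨hc, hmin⟩ := pv_find_pos cs (pvAlfa[l]) pos hidx
    obtain ⟨hge, hlt⟩ := pv_find_bound cs (pvAlfa[l]) pos hidx
    have hnn := pv_find_nonneg cs (pvAlfa[l]) pos hidx
    have hocc : pvOccsFrom cs (pvAlfa[l]) pos =
        (PySem.Chars.findFrom cs [pvAlfa[l]] (pos : Int) none).toNat ::
          pvOccsFrom cs (pvAlfa[l]) ((PySem.Chars.findFrom cs [pvAlfa[l]] (pos : Int) none).toNat + 1) := by
      rw [pvOccsFrom_skip cs (pvAlfa[l]) pos _ hge hmin, pvOccsFrom, dif_pos hlt, if_pos hc]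
    rw [ocLoop_letter cs l hl ((PySem.Chars.findFrom cs [pvAlfa[l]] (pos : Int) none).toNat + 1)
      (ix ++ [PySem.Chars.findFrom cs [pvAlfa[l]] (pos : Int) none]) _]
    rw [hocc]
    by_cases h2 : pvOccsFrom cs (pvAlfa[l]) ((PySem.Chars.findFrom cs [pvAlfa[l]] (pos : Int) none).toNat + 1) = []
    · rw [if_pos h2, h2]
      simp
      rw [max_eq_left hnn]
    · rw [if_neg h2, if_neg (by simp)]
      rw [PySem.Dict.insert_insert_self]
      simp
      rw [max_eq_left hnn]
termination_by cs.length + 1 - pos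
decreasing_by
  have := pv_find_bound cs (pvAlfa[l]) pos hidx
  omega

-- the whole inner while loop, letters l.. of pvAlfa
theorem ocLoop_all (cs : List Char) (l : Nat) (oc : PySem.Dict Char (List Int)) :
    ocLoop cs oc 0 l [] =
      (pvAlfa.drop l).foldl
        (fun d c => if pvOccs cs c ≠ [] then d.insert c ((pvOccs cs c).map Int.ofNat) else d)
        oc := by
  by_cases hl : l < pvAlfa.length
  · rw [ocLoop_letter cs l hl 0 [] oc, ocLoop_all cs (l + 1)]
    conv_rhs => rw [List.drop_eq_getElem_cons hl, List.foldl_cons]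
    congr 1
    by_cases h : pvOccs cs (pvAlfa[l]) = []
    · rw [if_pos (by simpa [pvOccs] using h), if_neg (by simp [h])]
    · rw [if_neg (by simpa [pvOccs] using h), if_pos (by simp [h])]
      simp [pvOccs]
  · rw [ocLoop, dif_neg hl, List.drop_eq_nil_of_le (by omega), List.foldl_nil]
termination_by pvAlfa.length - l

-- the letters of msg that occur, in alphabet order
def pvPresent (cs : List Char) : List Char :=
  pvAlfa.filter (fun c => decide (pvOccs cs c ≠ []))

def pvOC (cs : List Char) : PySem.Dict Char (List Int) :=
  (pvPresent cs).foldl (fun d c => d.insert c ((pvOccs cs c).map Int.ofNat)) PySem.Dict.empty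

theorem ocPass_eq (cs : List Char) (oc : PySem.Dict Char (List Int)) :
    ocLoop cs oc 0 0 [] =
      (pvPresent cs).foldl (fun d c => d.insert c ((pvOccs cs c).map Int.ofNat)) oc := by
  rw [ocLoop_all cs 0 oc, List.drop_zero]
  exact PySem.List.foldl_ite_eq_foldl_filter (fun c => pvOccs cs c ≠ [])
    (fun d c => d.insert c ((pvOccs cs c).map Int.ofNat)) pvAlfa oc

theorem pvPresent_nodup (cs : List Char) : (pvPresent cs).Nodup := by
  exact List.Nodup.filter _ (by decide : pvAlfa.Nodup)

theorem pvOC_items (cs : List Char) :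
    (pvOC cs).items = (pvPresent cs).map (fun c => (c, (pvOccs cs c).map Int.ofNat)) := by
  unfold pvOC
  rw [PySem.Dict.items_foldl_insert_fresh (pvPresent cs) (fun c => c)
    (fun c => (pvOccs cs c).map Int.ofNat) PySem.Dict.empty
    (fun a _ => PySem.Dict.contains_empty a)
    (by simpa using pvPresent_nodup cs)]
  simp [PySem.Dict.empty]

theorem pvOC_keys (cs : List Char) : (pvOC cs).keys = pvPresent cs := by
  simp only [PySem.Dict.keys, pvOC_items, List.map_map]
  simp [Function.comp_def]

theorem dict_insert_mem_eq_self {κ ν : Type} [BEq κ] [LawfulBEq κ]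
    (d : PySem.Dict κ ν) (k : κ) (v : ν) (hnd : d.keys.Nodup)
    (hkv : (k, v) ∈ d.items) : d.insert k v = d := by
  apply PySem.Dict.ext
  rw [PySem.Dict.items_insert_of_contains d v
    ((PySem.Dict.contains_iff_mem_keys d k).mpr (PySem.Dict.mem_keys_of_mem_items d hkv))]
  conv_rhs => rw [← List.map_id d.items]
  apply List.map_congr_left
  rintro ⟨p1, p2⟩ hp
  by_cases hpk : p1 = k
  · subst hpk
    have h1 := PySem.Dict.get?_of_mem_items d hkv hnd
    have h2 := PySem.Dict.get?_of_mem_items d hp hnd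
    rw [h1] at h2
    have hv : v = p2 := Option.some_inj.mp h2
    simp [hv]
  · simp [hpk]

theorem foldl_fixed_mem {α β : Type} (f : β → α → β) (b : β) :
    ∀ (L : List α), (∀ x ∈ L, f b x = b) → L.foldl f b = b := by
  intro L h
  induction L with
  | nil => rfl
  | cons x t ih =>
    rw [List.foldl_cons, h x (by simp)]
    exact ih (fun y hy => h y (by simp [hy]))

theorem ocPass_fixed (cs : List Char) : ocLoop cs (pvOC cs) 0 0 [] = pvOC cs := by
  rw [ocPass_eq]
  apply foldl_fixed_mem
  intro c hc
  apply dict_insert_mem_eq_self _ _ _ (by rw [pvOC_keys]; exact pvPresent_nodup cs)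
  rw [pvOC_items]
  exact List.mem_map_of_mem hc

theorem ocorrencias_eq (cs : List Char) : ocorrencias cs = pvOC cs := by
  unfold ocorrencias
  rcases Nat.eq_zero_or_pos cs.length with h0 | hpos
  · have hnil : cs = [] := List.eq_nil_of_length_eq_zero h0
    subst hnil
    have : PySem.List.pyRange 0 ((0 : Nat) : Int) 1 = [] := by decide
    simp only [List.length_nil, Nat.cast_zero]
    rw [show PySem.List.pyRange 0 (0 : Int) 1 = [] from by decide, List.foldl_nil]
    have hocc : ∀ c, pvOccs [] c = [] := by
      intro c; rw [pvOccs, pvOccsFrom]; simp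
    unfold pvOC pvPresent
    rw [List.filter_eq_nil_iff.mpr (by intro c _; simp [hocc c])]
    rfl
  · rw [PySem.List.pyRange_one_cons (by exact_mod_cast hpos), List.foldl_cons]
    have h1 : ocLoop cs PySem.Dict.empty 0 0 [] = pvOC cs := ocPass_eq cs PySem.Dict.empty
    rw [h1]
    generalize PySem.List.pyRange (0 + 1) (cs.length : Int) 1 = L
    induction L with
    | nil => rfl
    | cons x t ih => rw [List.foldl_cons, ocPass_fixed cs]; exact ih

-- ---- the replacement loop ----

-- pySplice at an in-range natural index is List.set
theorem pySplice_set (m : List Char) (p : Nat) (ch : Char) (hp : p < m.length) :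
    pySplice m (p : Int) ch = m.set p ch := by
  unfold pySplice
  rw [PySem.List.slice_to_natCast]
  rw [show ((p : Int) + 1) = ((p + 1 : Nat) : Int) by push_cast; ring]
  rw [PySem.List.slice_from_natCast]
  rw [List.set_eq_take_cons_drop ch hp]
  simp

-- reference form of the while-loop: set each position in turn, cycling through pvDec
def pvApply (c : Char) (q : List Int) (k : Nat) (m : List Char) : List Char :=
  match q with
  | [] => m
  | p :: t => pvApply c t (k + 1) (pySplice m p (pvDec c k))

theorem pvDec_add3 (c : Char) (k : Nat) : pvDec c (k + 3) = pvDec c k := by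
  unfold pvDec
  rw [Nat.add_mod_right]

theorem pvApply_add3 (c : Char) (q : List Int) (k : Nat) (m : List Char) :
    pvApply c q (k + 3) m = pvApply c q k m := by
  induction q generalizing k m with
  | nil => rfl
  | cons p t ih =>
    show pvApply c t (k + 3 + 1) _ = pvApply c t (k + 1) _
    rw [pvDec_add3, show k + 3 + 1 = k + 1 + 3 by omega, ih]

theorem pyGetD_cons_zero (p : Int) (t : List Int) (d : Int) :
    PySem.List.pyGetD (p :: t) 0 d = p := by
  simp [PySem.List.pyGetD]

theorem pyGetD_cons_one (p p2 : Int) (t : List Int) (d : Int) :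
    PySem.List.pyGetD (p :: p2 :: t) 1 d = p2 := by
  simp [PySem.List.pyGetD]

theorem pv_slice_two (p p2 : Int) (t : List Int) :
    PySem.List.slice (p :: p2 :: t) (some 2) none = t := by
  rw [PySem.List.slice_from (p :: p2 :: t) (by omega : (0:Int) ≤ 2)]
  rfl

theorem pv_slice_one (p : Int) (t : List Int) :
    PySem.List.slice (p :: t) (some 1) none = t := by
  rw [PySem.List.slice_from (p :: t) (by omega : (0:Int) ≤ 1)]
  rfl

theorem dcifWhile_eq (c : Char) (q : List Int) (m : List Char) :
    dcifWhile (pvT1.getD c ' ') (pvT2.getD c ' ') c q 0 m = pvApply c q 0 m := by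
  match q with
  | [] => rw [dcifWhile]; simp [pvApply]
  | [p] =>
    rw [dcifWhile]
    simp only [pyGetD_cons_zero]
    norm_num
    rw [dcifWhile]
    norm_num
    rfl
  | [p, p2] =>
    rw [dcifWhile]
    simp only [pyGetD_cons_zero, pyGetD_cons_one, pv_slice_two]
    norm_num
    rw [dcifWhile]
    norm_num
    rfl
  | p :: p2 :: p3 :: t =>
    rw [dcifWhile]
    simp only [pyGetD_cons_zero, pyGetD_cons_one, pv_slice_two, pv_slice_one]
    norm_num
    rw [dcifWhile_eq c t]
    show _ = pvApply c t 3 (pySplice (pySplice (pySplice m p (pvDec c 0)) p2 (pvDec c 1)) p3 (pvDec c 2))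
    rw [show (3 : Nat) = 0 + 3 by rfl, pvApply_add3]
    rfl
termination_by q.length

theorem pvApply_spec (c : Char) (ns : List Nat) (k : Nat) (m : List Char)
    (hnd : ns.Nodup) (hb : ∀ j ∈ ns, j < m.length) :
    (pvApply c (ns.map Int.ofNat) k m).length = m.length ∧
    ∀ i, (pvApply c (ns.map Int.ofNat) k m)[i]? =
      if i ∈ ns then if i < m.length then some (pvDec c (k + ns.idxOf i)) else none
      else m[i]? := by
  induction ns generalizing k m with
  | nil => simp [pvApply]
  | cons j t ih =>
    have hj : j < m.length := hb j (by simp)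
    have hstep : pvApply c ((j :: t).map Int.ofNat) k m
        = pvApply c (t.map Int.ofNat) (k + 1) (m.set j (pvDec c k)) := by
      show pvApply c (t.map Int.ofNat) (k + 1) (pySplice m (Int.ofNat j) (pvDec c k)) = _
      rw [show (Int.ofNat j) = (j : Int) by rfl, pySplice_set m j (pvDec c k) hj]
    have hnd' : t.Nodup := hnd.of_cons
    have hjt : j ∉ t := by simp at hnd; exact hnd.1
    have hb' : ∀ x ∈ t, x < (m.set j (pvDec c k)).length := by
      intro x hx; rw [List.length_set]; exact hb x (by simp [hx])
    obtain ⟨ihlen, ihget⟩ := ih (k + 1) (m.set j (pvDec c k)) hnd' hb'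
    rw [hstep]
    refine ⟨by rw [ihlen, List.length_set], ?_⟩
    intro i
    rw [ihget i]
    by_cases hit : i ∈ t
    · have hij : i ≠ j := fun h => hjt (h ▸ hit)
      have him : i < m.length := hb i (by simp [hit])
      rw [List.length_set, if_pos hit, if_pos him, if_pos (by simp [hit]), if_pos him]
      have : k + 1 + List.idxOf i t = k + List.idxOf i (j :: t) := by
        rw [List.idxOf_cons_ne _ (fun h => hij h.symm)]; omega
      rw [this]
    · by_cases hij : i = j
      · subst hij
        rw [if_neg hit]
        simp [hj, List.idxOf_cons_self]
      · rw [if_neg hit, if_neg (by simp [hij, hit]), List.getElem?_set,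
          if_neg (fun h => hij h.symm)]

-- ---- spec-side characterizations ----

theorem pvSpecGo_length (pre rest : List Char) : (pvSpecGo pre rest).length = rest.length := by
  induction rest generalizing pre with
  | nil => rfl
  | cons c t ih => simp [pvSpecGo, ih]

theorem pvSpecGo_getElem (pre rest : List Char) (i : Nat) (hi : i < rest.length) :
    (pvSpecGo pre rest)[i]? =
      some (if rest[i] ∈ pvSubs1 then pvDec rest[i] ((pre ++ rest.take i).count rest[i])
            else rest[i]) := by
  induction rest generalizing pre i with
  | nil => simp at hi
  | cons c t ih =>
    cases i with
    | zero => simp [pvSpecGo]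
    | succ n =>
      have hn : n < t.length := by simpa using hi
      show (pvSpecGo (pre ++ [c]) t)[n]? = _
      rw [ih (pre ++ [c]) n hn]
      simp

theorem mem_pvSubs1_iff (c : Char) : c ∈ pvSubs1 ↔ c ∈ pvAlfa := by
  exact (show pvSubs1.Perm pvAlfa from by decide).mem_iff

-- occurrence lists are in-range index lists
theorem pvOccs_bound (cs : List Char) (c : Char) (j : Nat) (hj : j ∈ pvOccs cs c) :
    j < cs.length := by
  rw [pvOccs, mem_pvOccsFrom] at hj
  by_contra hx
  rw [List.getElem?_eq_none (by omega)] at hj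
  simp at hj

-- invariant of the per-letter fold in dcif
theorem lettersFold (cs : List Char) (L : List Char) (done : List Char) (m : List Char)
    (hlen : m.length = cs.length)
    (hm : ∀ i (hi : i < cs.length),
      m[i]? = some (if cs[i] ∈ done then pvDec cs[i] ((cs.take i).count cs[i]) else cs[i])) :
    (L.foldl (fun acc c => pvApply c ((pvOccs cs c).map Int.ofNat) 0 acc) m).length = cs.length ∧
    ∀ i (hi : i < cs.length),
      (L.foldl (fun acc c => pvApply c ((pvOccs cs c).map Int.ofNat) 0 acc) m)[i]? =
        some (if cs[i] ∈ done ++ L then pvDec cs[i] ((cs.take i).count cs[i]) else cs[i]) := by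
  induction L generalizing done m with
  | nil => simpa using ⟨hlen, hm⟩
  | cons c L' ih =>
    rw [List.foldl_cons]
    have hb : ∀ j ∈ pvOccs cs c, j < m.length := fun j hj => hlen ▸ pvOccs_bound cs c j hj
    obtain ⟨hlen', hget'⟩ := pvApply_spec c (pvOccs cs c) 0 m (nodup_pvOccsFrom cs c 0) hb
    have hm' : ∀ i (hi : i < cs.length),
        (pvApply c ((pvOccs cs c).map Int.ofNat) 0 m)[i]? =
          some (if cs[i] ∈ done ++ [c] then pvDec cs[i] ((cs.take i).count cs[i]) else cs[i]) := by
      intro i hi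
      rw [hget' i]
      by_cases hocc : i ∈ pvOccs cs c
      · have hci : cs[i] = c := by
          rw [pvOccs, mem_pvOccsFrom] at hocc
          have := hocc.2
          rw [List.getElem?_eq_getElem hi] at this
          exact Option.some_inj.mp this
        rw [if_pos hocc, if_pos (hlen ▸ hi)]
        rw [pvOccs, idxOf_pvOccsFrom cs c 0 i (by omega)
          (by rw [List.getElem?_eq_getElem hi, hci]), pvCnt_count]
        rw [if_pos (by simp [hci]), hci]
        simp
      · have hci : cs[i] ≠ c := by
          intro hc
          apply hocc
          rw [pvOccs, mem_pvOccsFrom]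
          exact ⟨by omega, by rw [List.getElem?_eq_getElem hi, hc]⟩
        rw [if_neg hocc, hm i hi]
        by_cases hd : cs[i] ∈ done
        · rw [if_pos hd, if_pos (by simp [hd])]
        · rw [if_neg hd, if_neg (by simp [hd, hci])]
    have := ih (done ++ [c]) (pvApply c ((pvOccs cs c).map Int.ofNat) 0 m)
      (by rw [hlen', hlen]) hm'
    simpa using this

-- ---- A-side: dcif computes pvSpecGo ----

theorem mem_pvPresent_iff (cs : List Char) (i : Nat) (hi : i < cs.length) :
    cs[i] ∈ pvPresent cs ↔ cs[i] ∈ pvSubs1 := by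
  rw [mem_pvSubs1_iff]
  unfold pvPresent
  rw [List.mem_filter]
  constructor
  · exact fun h => h.1
  · intro h
    refine ⟨h, by
      simp only [ne_eq, decide_eq_true_eq]
      exact List.ne_nil_of_mem (show i ∈ pvOccs cs cs[i] by
        rw [pvOccs, mem_pvOccsFrom]
        exact ⟨by omega, List.getElem?_eq_getElem hi⟩)⟩

theorem dcif_eq_spec (msg : String) :
    dcif msg = String.ofList (pvSpecGo [] msg.toList) := by
  unfold dcif
  show String.ofList
      ((ocorrencias msg.toList).keys.foldl
        (fun m l => dcifWhile ((tabelaSubs pvAlfa pvSubs1).getD l ' ')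
          ((tabelaSubs pvAlfa pvSubs2).getD l ' ') l ((ocorrencias msg.toList).getD l []) 0 m)
        msg.toList)
      = String.ofList (pvSpecGo [] msg.toList)
  rw [ocorrencias_eq, pvOC_keys]
  congr 1
  generalize msg.toList = cs
  have hfold : (pvPresent cs).foldl
      (fun m l => dcifWhile ((tabelaSubs pvAlfa pvSubs1).getD l ' ')
        ((tabelaSubs pvAlfa pvSubs2).getD l ' ') l ((pvOC cs).getD l []) 0 m) cs
      = (pvPresent cs).foldl (fun acc c => pvApply c ((pvOccs cs c).map Int.ofNat) 0 acc) cs := by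
    apply PySem.List.foldl_congr_mem
    intro acc c hc
    have hval : (pvOC cs).getD c [] = (pvOccs cs c).map Int.ofNat := by
      apply PySem.Dict.getD_of_mem_items (pvOC cs)
        (by rw [pvOC_items]; exact List.mem_map_of_mem hc)
        (by rw [pvOC_keys]; exact pvPresent_nodup cs)
    rw [hval]
    exact dcifWhile_eq c ((pvOccs cs c).map Int.ofNat) acc
  rw [hfold]
  obtain ⟨hL, hG⟩ := lettersFold cs (pvPresent cs) [] cs rfl
    (by intro i hi; rw [List.getElem?_eq_getElem hi]; simp)
  apply List.ext_getElem?
  intro i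
  by_cases hi : i < cs.length
  · rw [hG i hi, pvSpecGo_getElem [] cs i hi]
    simp only [List.nil_append]
    by_cases hmem : cs[i] ∈ pvSubs1
    · rw [if_pos ((mem_pvPresent_iff cs i hi).mpr hmem), if_pos hmem]
    · rw [if_neg (fun h => hmem ((mem_pvPresent_iff cs i hi).mp h)), if_neg hmem]
  · rw [List.getElem?_eq_none (show (pvSpecGo [] cs).length ≤ i by rw [pvSpecGo_length]; omega),
      List.getElem?_eq_none (by rw [hL]; omega)]

-- ---- B-side: dcif_alt computes pvSpecGo ----

theorem dictB1_eq : PySem.Dict.ofList (pvSubs1.zip pvAlfa) = pvT1 := by decide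
theorem dictB2_eq : PySem.Dict.ofList (pvSubs2.zip pvAlfa) = pvT2 := by decide

theorem getD_irrel {κ ν : Type} [BEq κ] [LawfulBEq κ] (d : PySem.Dict κ ν) (k : κ)
    (a b : ν) (h : d.contains k = true) : d.getD k a = d.getD k b := by
  rw [PySem.Dict.contains_eq_isSome_get?] at h
  simp only [PySem.Dict.getD]
  cases hg : d.get? k with
  | none => rw [hg] at h; simp at h
  | some v => simp

theorem pvT1_keys : pvT1.keys = pvSubs1 := by decide
theorem pvT2_keys : pvT2.keys = pvSubs2 := by decide

theorem contB1 (ch : Char) :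
    (PySem.Dict.ofList (pvSubs1.zip pvAlfa)).contains ch = decide (ch ∈ pvSubs1) := by
  rw [dictB1_eq, PySem.Dict.contains_eq_decide_mem_keys, pvT1_keys]

theorem pvT1_contains (ch : Char) (h : ch ∈ pvSubs1) : pvT1.contains ch = true := by
  rw [PySem.Dict.contains_eq_decide_mem_keys, pvT1_keys]; simpa using h

theorem pvT2_contains (ch : Char) (h : ch ∈ pvSubs1) : pvT2.contains ch = true := by
  rw [PySem.Dict.contains_eq_decide_mem_keys, pvT2_keys]
  have : ch ∈ pvSubs2 := by
    have h2 := (show pvSubs1.Perm pvSubs2 from by decide).mem_iff.mp h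
    exact h2
  simpa using this

theorem decB (ch : Char) (n : Nat) (hmem : ch ∈ pvSubs1) :
    (if PySem.Int.mod (n : Int) 3 = 0 then (PySem.Dict.ofList (pvSubs1.zip pvAlfa)).getD ch ch
     else if PySem.Int.mod (n : Int) 3 = 1 then (PySem.Dict.ofList (pvSubs2.zip pvAlfa)).getD ch ch
     else ch) = pvDec ch n := by
  rw [dictB1_eq, dictB2_eq, show (3 : Int) = ((3 : Nat) : Int) from rfl, PySem.Int.mod_natCast]
  rw [getD_irrel pvT1 ch ch ' ' (pvT1_contains ch hmem)]
  rw [getD_irrel pvT2 ch ch ' ' (pvT2_contains ch hmem)]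
  unfold pvDec
  have h3 : n % 3 = 0 ∨ n % 3 = 1 ∨ n % 3 = 2 := by omega
  rcases h3 with h | h | h <;> simp [h]

-- proof-side name for the loop body of dcif_alt (definitionally the same lambda)
def pvBStep (st : PySem.Dict Char Int × List Char) (ch : Char) :
    PySem.Dict Char Int × List Char :=
  if (PySem.Dict.ofList (pvSubs1.zip pvAlfa)).contains ch then
    let k := st.1.getD ch 0
    let dec := if PySem.Int.mod k 3 = 0 then (PySem.Dict.ofList (pvSubs1.zip pvAlfa)).getD ch ch
               else if PySem.Int.mod k 3 = 1 then (PySem.Dict.ofList (pvSubs2.zip pvAlfa)).getD ch ch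
               else ch
    (st.1.insert ch (k + 1), st.2 ++ [dec])
  else (st.1, st.2 ++ [ch])

theorem altFold (cs : List Char) (pre : List Char) (counts : PySem.Dict Char Int)
    (out : List Char)
    (hinv : ∀ c ∈ pvSubs1, counts.getD c 0 = (pre.count c : Int)) :
    (cs.foldl pvBStep (counts, out)).2 = out ++ pvSpecGo pre cs := by
  induction cs generalizing pre counts out with
  | nil => simp [pvSpecGo]
  | cons ch t ih =>
    rw [List.foldl_cons]
    by_cases hmem : ch ∈ pvSubs1
    · have hstep : pvBStep (counts, out) ch
          = (counts.insert ch ((pre.count ch : Int) + 1), out ++ [pvDec ch (pre.count ch)]) := by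
        show (if (PySem.Dict.ofList (pvSubs1.zip pvAlfa)).contains ch then
            (counts.insert ch (counts.getD ch 0 + 1),
              out ++ [if PySem.Int.mod (counts.getD ch 0) 3 = 0 then
                        (PySem.Dict.ofList (pvSubs1.zip pvAlfa)).getD ch ch
                      else if PySem.Int.mod (counts.getD ch 0) 3 = 1 then
                        (PySem.Dict.ofList (pvSubs2.zip pvAlfa)).getD ch ch
                      else ch])
          else (counts, out ++ [ch])) = _
        rw [if_pos (by rw [contB1]; simpa using hmem)]
        rw [show counts.getD ch 0 = (pre.count ch : Int) from hinv ch hmem]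
        rw [decB ch (pre.count ch) hmem]
      have hinv' : ∀ c ∈ pvSubs1,
          (counts.insert ch ((pre.count ch : Int) + 1)).getD c 0
            = ((pre ++ [ch]).count c : Int) := by
        intro c hc
        by_cases hceq : c = ch
        · subst hceq
          rw [PySem.Dict.getD_insert_self]
          simp [List.count_append]
        · rw [PySem.Dict.getD_insert_of_ne _ _ _ hceq, hinv c hc]
          rw [List.count_append]
          have hne : ch ≠ c := fun h => hceq h.symm
          simp [hne]
      rw [hstep, ih (pre ++ [ch]) _ _ hinv']
      rw [show pvSpecGo pre (ch :: t)
          = (if ch ∈ pvSubs1 then pvDec ch (pre.count ch) else ch) :: pvSpecGo (pre ++ [ch]) t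
          from rfl]
      rw [if_pos hmem]
      simp
    · have hstep : pvBStep (counts, out) ch = (counts, out ++ [ch]) := by
        show (if (PySem.Dict.ofList (pvSubs1.zip pvAlfa)).contains ch then
            (counts.insert ch (counts.getD ch 0 + 1),
              out ++ [if PySem.Int.mod (counts.getD ch 0) 3 = 0 then
                        (PySem.Dict.ofList (pvSubs1.zip pvAlfa)).getD ch ch
                      else if PySem.Int.mod (counts.getD ch 0) 3 = 1 then
                        (PySem.Dict.ofList (pvSubs2.zip pvAlfa)).getD ch ch
                      else ch])
          else (counts, out ++ [ch])) = _
        rw [if_neg (by rw [contB1]; simpa using hmem)]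
      have hinv' : ∀ c ∈ pvSubs1,
          counts.getD c 0 = ((pre ++ [ch]).count c : Int) := by
        intro c hc
        rw [hinv c hc, List.count_append]
        have hne : ch ≠ c := fun h => hmem (h ▸ hc)
        simp [hne]
      rw [hstep, ih (pre ++ [ch]) _ _ hinv']
      rw [show pvSpecGo pre (ch :: t)
          = (if ch ∈ pvSubs1 then pvDec ch (pre.count ch) else ch) :: pvSpecGo (pre ++ [ch]) t
          from rfl]
      rw [if_neg hmem]
      simp

theorem dcif_alt_eq_spec (msg : String) :
    dcif_alt msg = String.ofList (pvSpecGo [] msg.toList) := by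
  show String.ofList ((msg.toList.foldl pvBStep (PySem.Dict.empty, [])).2)
      = String.ofList (pvSpecGo [] msg.toList)
  rw [altFold msg.toList [] PySem.Dict.empty []
    (by intro c _; rw [PySem.Dict.getD_empty]; simp)]
  rfl

-- ===== VERDICT (by name: the statement is the Claim_ definition above) =====
theorem dcif_spec : Claim_equal_dcif := by
  intro msg _
  show dcif msg = dcif_alt msg
  rw [dcif_eq_spec, dcif_alt_eq_spec]
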